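-- pv_equiv track=rewrite | github.com/Miki3553/Prueba | miki.py | asereje
-- ===== SOURCE A (Python) =====
-- def asereje (array, minimum):
--     array = array
--     m = minimum
--     higher = 0
--     for index in range(len(array)):
--         higher = max(higher, array[index])
--     n = 0
--     for x in range(1, higher + 1):
--         n = m * x
--         for index in range(len(array)):
--             if n == array[index]:
--                 return False
--     return True
-- ===== SOURCE B (Python) =====
-- def asereje(array, minimum):
--     higher = 0
--     for a in array:
--         higher = max(higher, a)
--     for a in array:
--         if minimum == 0:
--             if a == 0 and higher >= 1:
--                 return False
--         else:
--             q, r = divmod(a, minimum)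
--             if r == 0 and 1 <= q <= higher:
--                 return False
--     return True
-- ===== Notes on version B (the rewrite author's own statement) =====
-- stated objective: alternative
-- what changed: B makes one arithmetic pass over the elements (divmod test: a % m == 0 and 1 <= a//m <= max) instead of A's scan of the array for every candidate multiple m*x with x in 1..max.
import Mathlib
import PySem

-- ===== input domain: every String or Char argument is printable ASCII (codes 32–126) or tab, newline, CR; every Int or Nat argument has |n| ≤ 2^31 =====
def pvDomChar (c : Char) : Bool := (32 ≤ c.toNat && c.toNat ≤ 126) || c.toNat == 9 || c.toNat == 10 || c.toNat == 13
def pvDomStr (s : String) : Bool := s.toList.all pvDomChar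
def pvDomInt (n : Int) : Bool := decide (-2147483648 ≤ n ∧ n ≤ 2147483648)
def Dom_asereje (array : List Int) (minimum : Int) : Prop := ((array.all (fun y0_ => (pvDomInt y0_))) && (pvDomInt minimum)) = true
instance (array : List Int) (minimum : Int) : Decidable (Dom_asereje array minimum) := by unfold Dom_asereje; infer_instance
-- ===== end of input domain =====

-- B replaces A's scan over every candidate multiple 1..max by one arithmetic pass
-- over the elements (divmod test); objective: alternative (different algorithm, same result).

-- ===== PORT A =====
-- literal port: running max over indices, then for each x in 1..higher scan the array for m*x
def asereje (array : List Int) (minimum : Int) : Bool :=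
  let m := minimum
  let higher : Int :=
    (PySem.List.pyRange 0 array.length 1).foldl
      (fun h i => max h (PySem.List.pyGetD array i 0)) 0
  !((PySem.List.pyRange 1 (higher + 1) 1).any (fun x =>
      (PySem.List.pyRange 0 array.length 1).any (fun i =>
        m * x == PySem.List.pyGetD array i 0)))

-- ===== PORT B =====
-- one pass over the elements; divmod test instead of enumerating multiples
def asereje_alt (array : List Int) (minimum : Int) : Bool :=
  let higher : Int := array.foldl (fun h a => max h a) 0
  !(array.any (fun a =>
      if minimum == 0 then
        decide (a = 0) && decide (1 ≤ higher)
      else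
        (PySem.Int.mod a minimum == 0) &&
          decide (1 ≤ PySem.Int.floordiv a minimum) &&
          decide (PySem.Int.floordiv a minimum ≤ higher)))

-- ===== PRECONDITION & SPEC =====
def Spec_asereje (array : List Int) (minimum : Int) (out : Bool) : Prop := out = asereje_alt array minimum
instance (array : List Int) (minimum : Int) (out : Bool) : Decidable (Spec_asereje array minimum out) := by unfold Spec_asereje; infer_instance

-- ===== CLAIM (what is proved, stated in full; the proofs are below) =====
def Claim_equal_asereje : Prop := ∀ (array : List Int) (minimum : Int), Dom_asereje array minimum → Spec_asereje array minimum (asereje array minimum)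

-- ===== LEMMAS AND PROOFS =====

-- for m ≠ 0 and fixed bound H, "a is m·x for some x in [1,H]" ↔ the divmod test
theorem pv_mult_iff (m a H : Int) (hm : m ≠ 0) :
    (∃ x : Int, 1 ≤ x ∧ x ≤ H ∧ m * x = a) ↔
      (PySem.Int.mod a m = 0 ∧ 1 ≤ PySem.Int.floordiv a m ∧ PySem.Int.floordiv a m ≤ H) := by
  have hfm := PySem.Int.floordiv_mul_add_mod a m
  constructor
  · rintro ⟨x, hx1, hx2, hxa⟩
    have hdvd : m ∣ a := ⟨x, hxa.symm⟩
    have hmod : PySem.Int.mod a m = 0 := (PySem.Int.mod_eq_zero_iff_dvd a m).mpr hdvd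
    have hq : PySem.Int.floordiv a m = x := by
      have : PySem.Int.floordiv a m * m = m * x := by omega
      have := mul_right_cancel₀ hm (by linarith [mul_comm m x] : PySem.Int.floordiv a m * m = x * m)
      exact this
    exact ⟨hmod, by omega, by omega⟩
  · rintro ⟨hmod, h1, h2⟩
    exact ⟨PySem.Int.floordiv a m, h1, h2, by rw [mul_comm]; omega⟩

-- ===== VERDICT (by name: the statement is the Claim_ definition above) =====
theorem asereje_spec : Claim_equal_asereje := by
  intro array minimum _
  unfold Spec_asereje asereje asereje_alt
  simp only [PySem.List.foldl_pyRange_zero_pyGetD']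
  set H : Int := array.foldl (fun h a => max h a) 0 with hH
  have hH0 : 0 ≤ H := (PySem.List.le_foldl_max array 0).1
  congr 1
  rw [Bool.eq_iff_iff]
  simp only [List.any_eq_true, PySem.List.mem_pyRange_one, beq_iff_eq]
  constructor
  · rintro ⟨x, ⟨hx1, hx2⟩, i, hi, hxa⟩
    -- the matched element is a genuine element of the array
    have hmem : PySem.List.pyGetD array i 0 ∈ array := by
      rw [PySem.List.pyGetD_eq_getElem array 0 hi.1 hi.2]; exact List.getElem_mem _
    refine ⟨PySem.List.pyGetD array i 0, hmem, ?_⟩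
    by_cases hm : minimum = 0
    · simp only [hm, if_true]
      simp only [hm, zero_mul] at hxa
      simp [← hxa]; omega
    · simp only [hm, if_false]
      have := (pv_mult_iff minimum (PySem.List.pyGetD array i 0) H hm).mp
        ⟨x, hx1, by omega, hxa⟩
      simp [this.1, this.2.1, this.2.2]
  · rintro ⟨a, hmem, htest⟩
    by_cases hm : minimum = 0
    · simp only [hm, if_true, Bool.and_eq_true, decide_eq_true_eq] at htest
      refine ⟨1, ⟨le_refl 1, by omega⟩, ?_⟩
      obtain ⟨n, hn, rfl⟩ := List.mem_iff_getElem.mp hmem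
      refine ⟨(n : Int), ⟨by omega, by omega⟩, ?_⟩
      rw [PySem.List.pyGetD_eq_getElem array 0 (by omega) (by exact_mod_cast hn)]
      simp [hm, htest.1]
    · simp only [beq_iff_eq, hm, if_false, Bool.and_eq_true, beq_iff_eq, decide_eq_true_eq] at htest
      obtain ⟨x, hx1, hx2, hxa⟩ := (pv_mult_iff minimum a H hm).mpr ⟨htest.1.1, htest.1.2, htest.2⟩
      refine ⟨x, ⟨hx1, by omega⟩, ?_⟩
      obtain ⟨n, hn, rfl⟩ := List.mem_iff_getElem.mp hmem
      refine ⟨(n : Int), ⟨by omega, by omega⟩, ?_⟩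
      rw [PySem.List.pyGetD_eq_getElem array 0 (by omega) (by exact_mod_cast hn)]
      simpa using hxa
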